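-- pv_equiv track=rewrite | github.com/ilorrr/U-parking | simulation/qcar_spawner.py | _pick_spots_by_row
-- ===== SOURCE A (Python) =====
-- ROW_PRIORITY = {'A': 0, 'B': 1, 'C': 2, 'D': 3}
--
-- def _parse_label(label):
--     """
--     Parse spot label in either format:
--         Old: 'A0'     -> row_letter='A', col=0
--         New: 'S1-A0'  -> row_letter='A', col=0
--     """
--     # Strip section prefix if present (e.g. 'S1-')
--     core = label.split('-')[-1]   # 'A0' from 'S1-A0' or just 'A0'
--     row_letter = core[0]
--     try:
--         col = int(core[1:])
--     except ValueError:
--         col = 999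
--     return row_letter, col
--
-- def _pick_spots_by_row(free_spots, count):
--     """
--     Select the closest available spot from each row in round-robin order
--     so QCars are distributed across rows A, B, C, D rather than piling
--     into row A.
--
--     For each row, spots are sorted by column (low = closer to entrance).
--     Selection cycles through rows A->B->C->D repeatedly until count is met.
--     """
--     from collections import defaultdict
--
--     # Group free spots by row letter, sorted by column within each row
--     rows = defaultdict(list)
--     for s in free_spots:
--         row_letter, col = _parse_label(s["label"])
--         rows[row_letter].append((col, s))
--
--     # Sort each row's spots by column ascending (closest first)
--     for letter in rows:
--         rows[letter].sort(key=lambda x: x[0])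
--
--     # Round-robin through rows in order A->B->C->D
--     row_order = sorted(rows.keys(), key=lambda r: ROW_PRIORITY.get(r, 99))
--     chosen = []
--     row_idx = [0] * len(row_order)   # pointer per row
--
--     while len(chosen) < count:
--         added_any = False
--         for i, letter in enumerate(row_order):
--             if len(chosen) >= count:
--                 break
--             if row_idx[i] < len(rows[letter]):
--                 _, spot = rows[letter][row_idx[i]]
--                 chosen.append(spot)
--                 row_idx[i] += 1
--                 added_any = True
--         if not added_any:
--             break   # all rows exhausted
--
--     return chosen
-- ===== SOURCE B (Python) =====
-- ROW_PRIORITY = {'A': 0, 'B': 1, 'C': 2, 'D': 3}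
--
-- def _parse_label(label):
--     core = label.split('-')[-1]
--     row_letter = core[0]
--     try:
--         col = int(core[1:])
--     except ValueError:
--         col = 999
--     return row_letter, col
--
-- def _pick_spots_by_row(free_spots, count):
--     # Key every spot by (rank = its position within its column-sorted row,
--     # row_index = its row's position in priority order) and do ONE global
--     # stable sort on that key: the first `count` keyed spots are exactly the
--     # round-robin selection (rank k of every row comes before rank k+1 of any
--     # row, rows in priority order within a rank).  No round-robin loop, no
--     # cursors, no flags.
--     rows = {}
--     for s in free_spots:
--         r, c = _parse_label(s["label"])
--         rows.setdefault(r, []).append((c, s))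
--     order = sorted(rows, key=lambda r: ROW_PRIORITY.get(r, 99))
--     keyed = [(rank, ri, s)
--              for ri, r in enumerate(order)
--              for rank, (_, s) in enumerate(sorted(rows[r], key=lambda t: t[0]))]
--     keyed.sort(key=lambda t: (t[0], t[1]))
--     return [s for _, _, s in keyed[:max(count, 0)]]
-- ===== Notes on version B (the rewrite author's own statement) =====
-- stated objective: alternative
-- what changed: A runs a stateful round-robin while-loop cycling per-row cursor indices with an added_any flag and early breaks; B instead assigns every spot a key (rank within its column-sorted row, row position in priority order), does ONE global stable sort on that key and slices the first count entries - no loop over rows, no cursors, no flags.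
import Mathlib
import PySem

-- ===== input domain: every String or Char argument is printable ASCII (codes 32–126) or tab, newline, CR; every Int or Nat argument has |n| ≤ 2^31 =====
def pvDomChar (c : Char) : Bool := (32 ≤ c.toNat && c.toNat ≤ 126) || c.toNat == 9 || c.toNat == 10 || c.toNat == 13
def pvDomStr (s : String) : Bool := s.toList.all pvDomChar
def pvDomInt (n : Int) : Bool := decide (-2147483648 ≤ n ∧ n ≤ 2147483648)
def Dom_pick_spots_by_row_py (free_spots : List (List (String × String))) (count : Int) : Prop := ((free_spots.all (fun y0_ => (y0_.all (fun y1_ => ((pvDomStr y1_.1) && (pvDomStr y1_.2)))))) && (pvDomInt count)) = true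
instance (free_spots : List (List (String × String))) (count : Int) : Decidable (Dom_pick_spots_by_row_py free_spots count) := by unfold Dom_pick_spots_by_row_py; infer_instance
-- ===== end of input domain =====

-- B replaces A's stateful round-robin while-loop (per-row cursors, added_any flag) by
-- keying every spot with (rank within its column-sorted row, row position in priority
-- order), ONE global stable sort on that key, and a slice of the first `count` entries.
-- Equivalence of the RETURN value is proved on Pre_ (inputs where the Python A returns).

abbrev PvSpot := List (String × String)

-- ===== PORT A =====
-- ROW_PRIORITY = {'A': 0, 'B': 1, 'C': 2, 'D': 3} (keys are the single row letters)
def pvRowPriorityA : PySem.Dict Char Int := PySem.Dict.mk [('A', 0), ('B', 1), ('C', 2), ('D', 3)]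

-- _parse_label: core = label.split('-')[-1]; row_letter = core[0]; col = int(core[1:]) or 999.
-- split? is never none (separator "-" is nonempty), and its result is nonempty so [-1] never
-- raises; core[0] raises IndexError on an empty core — excluded by Pre_, default ' ' unused there.
-- core[1:] on chars is drop 1 (exact); int(...) is PySem.Int.ofChars? (none = ValueError → 999).
def pvParseA (label : String) : Char × Int :=
  let core := PySem.List.pyGetD ((PySem.Str.split? label "-").getD []) (-1) ""
  let row := (PySem.Str.pyGet? core 0).getD ' '
  let col : Int :=
    match PySem.Int.ofChars? (core.toList.drop 1) with
    | some v => v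
    | none => 999
  (row, col)

-- s["label"]; a missing key is a KeyError — excluded by Pre_, default "" unused there
def pvLabelA (s : List (String × String)) : String := ((PySem.Dict.mk s).get? "label").getD ""

-- rows = defaultdict(list); for s in free_spots: rows[row_letter].append((col, s))
def pvRowsA (free_spots : List (List (String × String))) : PySem.Dict Char (List (Int × PvSpot)) :=
  free_spots.foldl
    (fun d s =>
      let rc := pvParseA (pvLabelA s)
      d.modify rc.1 [] (fun l => l ++ [(rc.2, s)]))
    PySem.Dict.empty

-- for letter in rows: rows[letter].sort(key=lambda x: x[0])  (each value sorted in place)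
def pvRows2A (free_spots : List (List (String × String))) : PySem.Dict Char (List (Int × PvSpot)) :=
  PySem.Dict.mk ((pvRowsA free_spots).items.map (fun p => (p.1, PySem.List.sorted p.2 (fun x => x.1))))

-- row_order = sorted(rows.keys(), key=lambda r: ROW_PRIORITY.get(r, 99))
def pvOrderA (free_spots : List (List (String × String))) : List Char :=
  PySem.List.sorted (pvRows2A free_spots).keys (fun r => pvRowPriorityA.getD r 99)

-- the inner 'for i, letter in enumerate(row_order)' with its 'break' at count
def pvInnerA (rows : PySem.Dict Char (List (Int × PvSpot))) (count : Int) :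
    List (Int × Char) → List PvSpot → List Int → Bool → List PvSpot × List Int × Bool
  | [], chosen, ridx, added => (chosen, ridx, added)
  | (i, letter) :: rest, chosen, ridx, added =>
    if count ≤ (chosen.length : Int) then (chosen, ridx, added)
    else if PySem.List.pyGetD ridx i 0 < ((rows.getD letter []).length : Int) then
      pvInnerA rows count rest
        (chosen ++ [(PySem.List.pyGetD (rows.getD letter []) (PySem.List.pyGetD ridx i 0) (0, [])).2])
        (PySem.List.pySetD ridx i (PySem.List.pyGetD ridx i 0 + 1)) true
    else
      pvInnerA rows count rest chosen ridx added

-- the outer 'while len(chosen) < count' loop; fuel only makes the recursion structural: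
-- free_spots.length + 2 passes always suffice (proved in pvOuterA_spec below), so the
-- fuel-exhausted branch is never taken on any input
def pvOuterA (rows : PySem.Dict Char (List (Int × PvSpot))) (order : List Char) (count : Int) :
    Nat → List PvSpot → List Int → List PvSpot
  | 0, chosen, _ => chosen
  | fuel + 1, chosen, ridx =>
    if (chosen.length : Int) < count then
      let r := pvInnerA rows count (PySem.List.enumerate order) chosen ridx false
      if r.2.2 then pvOuterA rows order count fuel r.1 r.2.1 else r.1
    else chosen

def pick_spots_by_row_py (free_spots : List (List (String × String))) (count : Int) :
    List (List (String × String)) :=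
  let rows := pvRows2A free_spots
  let order := pvOrderA free_spots
  pvOuterA rows order count (free_spots.length + 2) [] (List.replicate order.length 0)

-- ===== PORT B =====
def pvRowPriorityB : PySem.Dict Char Int := PySem.Dict.mk [('A', 0), ('B', 1), ('C', 2), ('D', 3)]

-- same _parse_label helper as the source module (B's Source B keeps it verbatim)
def pvParseB (label : String) : Char × Int :=
  let core := PySem.List.pyGetD ((PySem.Str.split? label "-").getD []) (-1) ""
  let row := (PySem.Str.pyGet? core 0).getD ' '
  let col : Int :=
    match PySem.Int.ofChars? (core.toList.drop 1) with
    | some v => v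
    | none => 999
  (row, col)

def pvLabelB (s : List (String × String)) : String := ((PySem.Dict.mk s).get? "label").getD ""

-- rows = {}; for s in free_spots: rows.setdefault(r, []).append((c, s))
def pvRowsB (free_spots : List (List (String × String))) : PySem.Dict Char (List (Int × PvSpot)) :=
  free_spots.foldl
    (fun d s =>
      let rc := pvParseB (pvLabelB s)
      d.insert rc.1 (d.getD rc.1 [] ++ [(rc.2, s)]))
    PySem.Dict.empty

-- order = sorted(rows, key=lambda r: ROW_PRIORITY.get(r, 99))
def pvOrderB (free_spots : List (List (String × String))) : List Char :=
  PySem.List.sorted (pvRowsB free_spots).keys (fun r => pvRowPriorityB.getD r 99)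

-- keyed = [(rank, ri, s) for ri, r in enumerate(order)
--                        for rank, (_, s) in enumerate(sorted(rows[r], key=lambda t: t[0]))]
def pvKeyedB (free_spots : List (List (String × String))) : List (Int × Int × PvSpot) :=
  (PySem.List.enumerate (pvOrderB free_spots)).flatMap (fun p =>
    (PySem.List.enumerate (PySem.List.sorted ((pvRowsB free_spots).getD p.2 []) (fun t => t.1))).map
      (fun q => (q.1, p.1, q.2.2)))

-- keyed.sort(key=lambda t: (t[0], t[1])); return [s for _, _, s in keyed[:max(count, 0)]]
def pick_spots_by_row_py_alt (free_spots : List (List (String × String))) (count : Int) :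
    List (List (String × String)) :=
  (PySem.List.slice
      (PySem.List.sorted2 (pvKeyedB free_spots) (fun t => t.1) (fun t => t.2.1))
      none (some (max count 0))).map (fun t => t.2.2)

-- ===== PRECONDITION & SPEC =====
-- Pre_ excludes exactly the inputs on which the Python A raises: a dict without a "label"
-- key (KeyError) or a label whose last '-'-segment is empty, e.g. "" or "S1-" (IndexError).
def Pre_pick_spots_by_row_py (free_spots : List (List (String × String))) (count : Int) : Prop :=
  free_spots.all (fun s =>
    ((PySem.Dict.mk s).get? "label").any
      (fun l => !(PySem.List.pyGetD ((PySem.Str.split? l "-").getD []) (-1) "").toList.isEmpty)) = true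
instance (free_spots : List (List (String × String))) (count : Int) :
    Decidable (Pre_pick_spots_by_row_py free_spots count) := by
  unfold Pre_pick_spots_by_row_py; infer_instance

def pvWitness_pick_spots_by_row_py : (List (List (String × String))) × Int :=
  ([[("label", "A0")], [("label", "S1-B2")], [("label", "A1")]], 2)

def Spec_pick_spots_by_row_py (free_spots : List (List (String × String))) (count : Int)
    (out : List (List (String × String))) : Prop :=
  out = pick_spots_by_row_py_alt free_spots count
instance (free_spots : List (List (String × String))) (count : Int)
    (out : List (List (String × String))) :
    Decidable (Spec_pick_spots_by_row_py free_spots count out) := by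
  unfold Spec_pick_spots_by_row_py; infer_instance

-- ===== CLAIM (what is proved, stated in full; the proofs are below) =====
def Claim_equal_pick_spots_by_row_py : Prop :=
  ∀ (free_spots : List (List (String × String))) (count : Int),
    Dom_pick_spots_by_row_py free_spots count → Pre_pick_spots_by_row_py free_spots count →
    Spec_pick_spots_by_row_py free_spots count (pick_spots_by_row_py free_spots count)

-- ===== LEMMAS AND PROOFS =====

-- one layer of the round-robin order: the t-th element of every row that has one
def pvLayer {α : Type} (dflt : α) (cols : List (List α)) (t : Nat) : List α :=
  (cols.filter (fun c => t < c.length)).map (fun c => c.getD t dflt)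

-- layers t, t+1, …, t+d-1 concatenated
def pvRest {α : Type} (dflt : α) (cols : List (List α)) : Nat → Nat → List α
  | 0, _ => []
  | d + 1, t => pvLayer dflt cols t ++ pvRest dflt cols d (t + 1)

-- what one inner pass of A appends, reading row suffix os at depth t
def pvPicks (rows : PySem.Dict Char (List (Int × PvSpot))) (os : List Char) (t : Nat) : List PvSpot :=
  ((os.map (fun r => rows.getD r [])).filter (fun c => t < c.length)).map
    (fun c => (c.getD t (0, [])).2)

-- the column-sorted spot lists per row, in A's row order (proof-only view shared by both sides)
def pvColsB (free_spots : List (List (String × String))) : List (List PvSpot) :=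
  (pvOrderB free_spots).map
    (fun r => (PySem.List.sorted ((pvRowsB free_spots).getD r []) (fun x => x.1)).map (fun x => x.2))

lemma pvInnerA_nil (rows : PySem.Dict Char (List (Int × PvSpot))) (count : Int)
    (chosen : List PvSpot) (ridx : List Int) (added : Bool) :
    pvInnerA rows count [] chosen ridx added = (chosen, ridx, added) := rfl

lemma pvInnerA_cons (rows : PySem.Dict Char (List (Int × PvSpot))) (count i : Int) (letter : Char)
    (rest : List (Int × Char)) (chosen : List PvSpot) (ridx : List Int) (added : Bool) :
    pvInnerA rows count ((i, letter) :: rest) chosen ridx added =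
      if count ≤ (chosen.length : Int) then (chosen, ridx, added)
      else if PySem.List.pyGetD ridx i 0 < ((rows.getD letter []).length : Int) then
        pvInnerA rows count rest
          (chosen ++ [(PySem.List.pyGetD (rows.getD letter []) (PySem.List.pyGetD ridx i 0) (0, [])).2])
          (PySem.List.pySetD ridx i (PySem.List.pyGetD ridx i 0 + 1)) true
      else pvInnerA rows count rest chosen ridx added := rfl

lemma pvOuterA_succ (rows : PySem.Dict Char (List (Int × PvSpot))) (order : List Char)
    (count : Int) (fuel : Nat) (chosen : List PvSpot) (ridx : List Int) :
    pvOuterA rows order count (fuel + 1) chosen ridx =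
      if (chosen.length : Int) < count then
        (if (pvInnerA rows count (PySem.List.enumerate order) chosen ridx false).2.2 then
          pvOuterA rows order count fuel
            (pvInnerA rows count (PySem.List.enumerate order) chosen ridx false).1
            (pvInnerA rows count (PySem.List.enumerate order) chosen ridx false).2.1
        else (pvInnerA rows count (PySem.List.enumerate order) chosen ridx false).1)
      else chosen := rfl

lemma pvGet?_mapVals {β γ : Type} (l : List (Char × β)) (f : β → γ) (k : Char) :
    (PySem.Dict.mk (l.map (fun p => (p.1, f p.2)))).get? k =
      ((PySem.Dict.mk l).get? k).map f := by
  induction l with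
  | nil => rfl
  | cons p rest ih =>
    simp only [List.map_cons, PySem.Dict.get?, List.find?] at *
    by_cases h : p.1 == k
    · simp [h]
    · simp only [h] at *; simpa using ih

lemma pvParseB_eq : pvParseB = pvParseA := rfl
lemma pvLabelB_eq : pvLabelB = pvLabelA := rfl

lemma pvRowsB_eq_rowsA (fs : List (List (String × String))) : pvRowsB fs = pvRowsA fs := by
  have hfun : (fun (d : PySem.Dict Char (List (Int × PvSpot))) (s : List (String × String)) =>
      let rc := pvParseB (pvLabelB s)
      d.insert rc.1 (d.getD rc.1 [] ++ [(rc.2, s)])) =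
      (fun (d : PySem.Dict Char (List (Int × PvSpot))) (s : List (String × String)) =>
      let rc := pvParseA (pvLabelA s)
      d.modify rc.1 [] (fun l => l ++ [(rc.2, s)])) := by
    funext d s
    rw [pvParseB_eq, pvLabelB_eq]
    rfl
  unfold pvRowsB pvRowsA
  rw [hfun]

lemma pvRows2A_getD (fs : List (List (String × String))) (r : Char) :
    (pvRows2A fs).getD r [] = PySem.List.sorted ((pvRowsA fs).getD r []) (fun x => x.1) := by
  unfold pvRows2A
  rw [PySem.Dict.getD_eq_get?_getD, PySem.Dict.getD_eq_get?_getD,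
    pvGet?_mapVals (pvRowsA fs).items (fun v => PySem.List.sorted v (fun x => x.1)) r]
  cases h : (PySem.Dict.mk (pvRowsA fs).items).get? r with
  | none =>
    simp [(PySem.List.sorted_eq_nil_iff ([] : List (Int × PvSpot)) (fun x => x.1) false).mpr rfl]
  | some v =>
    simp

lemma pvRows2A_keys (fs : List (List (String × String))) :
    (pvRows2A fs).keys = (pvRowsA fs).keys := by
  unfold pvRows2A
  simp [PySem.Dict.keys, List.map_map, Function.comp]

-- the flat list of (row letter, (col, spot)) triples A's grouping loop processes
def pvTriples (fs : List (List (String × String))) : List (Char × (Int × PvSpot)) :=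
  fs.map (fun s => ((pvParseA (pvLabelA s)).1, ((pvParseA (pvLabelA s)).2, s)))

lemma pvRowsA_eq_foldl (fs : List (List (String × String))) :
    pvRowsA fs = (pvTriples fs).foldl
      (fun d p => d.modify p.1 [] (fun l => l ++ [p.2])) PySem.Dict.empty := by
  unfold pvRowsA pvTriples
  rw [List.foldl_map]

lemma pvRowsA_getD (fs : List (List (String × String))) (r : Char) :
    (pvRowsA fs).getD r [] =
      ((pvTriples fs).filter (fun p => p.1 == r)).map (fun p => p.2) := by
  rw [pvRowsA_eq_foldl, PySem.Dict.getD_foldl_modify_append]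
  simp [PySem.Dict.getD_empty]

lemma pvRowsA_getD_len_le (fs : List (List (String × String))) (r : Char) :
    ((pvRowsA fs).getD r []).length ≤ fs.length := by
  rw [pvRowsA_getD]
  calc (((pvTriples fs).filter (fun p => p.1 == r)).map (fun p => p.2)).length
      = ((pvTriples fs).filter (fun p => p.1 == r)).length := List.length_map ..
    _ ≤ (pvTriples fs).length := List.length_filter_le ..
    _ = fs.length := List.length_map ..

lemma pvRest_eq_nil {α : Type} (dflt : α) (cols : List (List α)) :
    ∀ (d t : Nat), (∀ c ∈ cols, c.length ≤ t) → pvRest dflt cols d t = [] := by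
  intro d
  induction d with
  | zero => intro t _; rfl
  | succ d ih =>
    intro t h
    show pvLayer dflt cols t ++ pvRest dflt cols d (t + 1) = []
    have h1 : pvLayer dflt cols t = [] := by
      unfold pvLayer
      rw [List.filter_eq_nil_iff.mpr]
      · rfl
      · intro c hc; simpa using Nat.not_lt.mpr (h c hc)
    rw [h1, ih (t + 1) (fun c hc => (h c hc).trans (Nat.le_succ t)), List.nil_append]

lemma pvLayer_cons_of_lt (rows : PySem.Dict Char (List (Int × PvSpot))) (r : Char)
    (os : List Char) (t : Nat) (hl : t < (rows.getD r []).length) :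
    pvPicks rows (r :: os) t = ((rows.getD r []).getD t (0, [])).2 :: pvPicks rows os t := by
  unfold pvPicks
  simp [hl]

lemma pvLayer_cons_of_ge (rows : PySem.Dict Char (List (Int × PvSpot))) (r : Char)
    (os : List Char) (t : Nat) (hl : ¬ t < (rows.getD r []).length) :
    pvPicks rows (r :: os) t = pvPicks rows os t := by
  unfold pvPicks
  simp [hl]

lemma pvPicks_eq_layer (rows : PySem.Dict Char (List (Int × PvSpot))) (os : List Char) (t : Nat) :
    pvPicks rows os t = pvLayer [] (os.map (fun r => (rows.getD r []).map (fun x => x.2))) t := by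
  induction os with
  | nil => rfl
  | cons r os' ih =>
    by_cases hl : t < (rows.getD r []).length
    · rw [pvLayer_cons_of_lt rows r os' t hl]
      have hR : pvLayer [] ((r :: os').map (fun r => (rows.getD r []).map (fun x => x.2))) t =
          ((rows.getD r []).map (fun x => x.2)).getD t [] ::
            pvLayer [] (os'.map (fun r => (rows.getD r []).map (fun x => x.2))) t := by
        unfold pvLayer
        simp [hl]
      rw [hR, ih]
      congr 1
      rw [List.getD_eq_getElem _ _ hl, List.getD_eq_getElem _ _ (by simpa using hl),
        List.getElem_map]
    · rw [pvLayer_cons_of_ge rows r os' t hl]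
      have hR : pvLayer [] ((r :: os').map (fun r => (rows.getD r []).map (fun x => x.2))) t =
          pvLayer [] (os'.map (fun r => (rows.getD r []).map (fun x => x.2))) t := by
        unfold pvLayer
        simp [hl]
      rw [hR, ih]

-- inner pass, unconditional: the chosen list and the added flag
lemma pvInnerA_run (rows : PySem.Dict Char (List (Int × PvSpot))) (count : Int) (t : Nat) :
    ∀ (os : List Char) (pre : List Int) (chosen : List PvSpot) (added : Bool),
      (pvInnerA rows count (PySem.List.enumerate os (pre.length : Int)) chosen
          (pre ++ os.map (fun r => ((min t ((rows.getD r []).length) : Nat) : Int))) added).1 =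
        chosen ++ (pvPicks rows os t).take ((count - chosen.length).toNat) ∧
      (pvInnerA rows count (PySem.List.enumerate os (pre.length : Int)) chosen
          (pre ++ os.map (fun r => ((min t ((rows.getD r []).length) : Nat) : Int))) added).2.2 =
        (added || (decide ((chosen.length : Int) < count) && !(pvPicks rows os t).isEmpty)) := by
  intro os
  induction os with
  | nil =>
    intro pre chosen added
    have hp : pvPicks rows [] t = [] := rfl
    simp [PySem.List.enumerate_nil, pvInnerA_nil, hp]
  | cons r os' ih =>
    intro pre chosen added
    rw [PySem.List.enumerate_cons, List.map_cons, pvInnerA_cons]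
    by_cases hc : count ≤ (chosen.length : Int)
    · rw [if_pos hc]
      have hn : (count - (chosen.length : Int)).toNat = 0 := by omega
      have hd : decide ((chosen.length : Int) < count) = false := by simp; omega
      simp [hn, hd]
    · rw [if_neg hc]
      have hc' : (chosen.length : Int) < count := by omega
      have hidx : PySem.List.pyGetD
          (pre ++ ((min t ((rows.getD r []).length) : Nat) : Int) ::
            os'.map (fun r => ((min t ((rows.getD r []).length) : Nat) : Int))) (pre.length : Int) 0 =
          ((min t ((rows.getD r []).length) : Nat) : Int) := by
        rw [PySem.List.pyGetD_natCast]
        simp [List.getD_eq_getElem?_getD]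
      rw [hidx]
      by_cases hl : t < (rows.getD r []).length
      · rw [if_pos (by exact_mod_cast Nat.lt_of_lt_of_le (min_lt_iff.mpr (Or.inl hl) : min t _ < _) le_rfl)]
        have hmin : min t ((rows.getD r []).length) = t := Nat.min_eq_left hl.le
        have hset : PySem.List.pySetD
            (pre ++ ((min t ((rows.getD r []).length) : Nat) : Int) ::
              os'.map (fun r => ((min t ((rows.getD r []).length) : Nat) : Int))) (pre.length : Int)
            (((min t ((rows.getD r []).length) : Nat) : Int) + 1) =
            (pre ++ [((min (t+1) ((rows.getD r []).length) : Nat) : Int)]) ++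
              os'.map (fun r => ((min t ((rows.getD r []).length) : Nat) : Int)) := by
          rw [PySem.List.pySetD_natCast]
          have : ((min t ((rows.getD r []).length) : Nat) : Int) + 1 =
              ((min (t+1) ((rows.getD r []).length) : Nat) : Int) := by
            rw [hmin, Nat.min_eq_left hl]; push_cast; ring
          rw [this]
          simp
        have hval : PySem.List.pyGetD (rows.getD r [])
            ((min t ((rows.getD r []).length) : Nat) : Int) (0, ([] : PvSpot)) =
            (rows.getD r []).getD t (0, []) := by
          rw [PySem.List.pyGetD_natCast, hmin]
        rw [hset, hval]
        have hstart : (pre.length : Int) + 1 =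
            (((pre ++ [((min (t+1) ((rows.getD r []).length) : Nat) : Int)]).length : Nat) : Int) := by
          simp
        rw [hstart]
        obtain ⟨ih1, ih2⟩ := ih (pre ++ [((min (t+1) ((rows.getD r []).length) : Nat) : Int)])
          (chosen ++ [((rows.getD r []).getD t (0, [])).2]) true
        constructor
        · rw [ih1, pvLayer_cons_of_lt rows r os' t hl]
          have hn : (count - (chosen.length : Int)).toNat =
              (count - ((chosen ++ [((rows.getD r []).getD t (0, [])).2]).length : Int)).toNat + 1 := by
            simp; omega
          rw [hn, List.take_succ_cons]
          simp
        · rw [ih2, pvLayer_cons_of_lt rows r os' t hl]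
          simp [hc']
      · rw [if_neg (by simp [Nat.min_eq_right (Nat.le_of_not_lt hl)])]
        rw [List.append_cons]
        have hstart : (pre.length : Int) + 1 =
            (((pre ++ [((min t ((rows.getD r []).length) : Nat) : Int)]).length : Nat) : Int) := by
          simp
        rw [hstart]
        obtain ⟨ih1, ih2⟩ := ih (pre ++ [((min t ((rows.getD r []).length) : Nat) : Int)]) chosen added
        rw [pvLayer_cons_of_ge rows r os' t hl]
        exact ⟨ih1, ih2⟩

-- inner pass without a break: the cursor list advances uniformly to depth t+1
lemma pvInnerA_ridx (rows : PySem.Dict Char (List (Int × PvSpot))) (count : Int) (t : Nat) :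
    ∀ (os : List Char) (pre : List Int) (chosen : List PvSpot) (added : Bool),
      ((chosen.length : Int) + ((pvPicks rows os t).length : Int) ≤ count) →
      (pvInnerA rows count (PySem.List.enumerate os (pre.length : Int)) chosen
          (pre ++ os.map (fun r => ((min t ((rows.getD r []).length) : Nat) : Int))) added).2.1 =
        pre ++ os.map (fun r => ((min (t + 1) ((rows.getD r []).length) : Nat) : Int)) := by
  intro os
  induction os with
  | nil =>
    intro pre chosen added _
    simp [PySem.List.enumerate_nil, pvInnerA_nil]
  | cons r os' ih =>
    intro pre chosen added hno
    rw [PySem.List.enumerate_cons, List.map_cons, pvInnerA_cons]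
    by_cases hc : count ≤ (chosen.length : Int)
    · rw [if_pos hc]
      have hp : pvPicks rows (r :: os') t = [] := by
        have : (pvPicks rows (r :: os') t).length = 0 := by omega
        exact List.eq_nil_of_length_eq_zero this
      have hall : ∀ x ∈ r :: os', (rows.getD x []).length ≤ t := by
        intro x hx
        by_contra hgt
        push_neg at hgt
        have hmem : rows.getD x [] ∈
            (((r :: os').map (fun r => rows.getD r [])).filter (fun c => t < c.length)) :=
          List.mem_filter.mpr ⟨List.mem_map_of_mem hx, by simpa using hgt⟩
        have : pvPicks rows (r :: os') t ≠ [] := by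
          unfold pvPicks
          intro hnil
          rw [List.map_eq_nil_iff] at hnil
          rw [hnil] at hmem
          exact (List.not_mem_nil) hmem
        exact this hp
      show pre ++ _ :: _ = _
      rw [List.map_cons]
      congr 2
      · congr 1
        have h1 := hall r (List.mem_cons_self)
        omega
      · apply List.map_congr_left
        intro x hx
        have := hall x (List.mem_cons_of_mem r hx)
        congr 1
        omega
    · rw [if_neg hc]
      have hidx : PySem.List.pyGetD
          (pre ++ ((min t ((rows.getD r []).length) : Nat) : Int) ::
            os'.map (fun r => ((min t ((rows.getD r []).length) : Nat) : Int))) (pre.length : Int) 0 =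
          ((min t ((rows.getD r []).length) : Nat) : Int) := by
        rw [PySem.List.pyGetD_natCast]
        simp [List.getD_eq_getElem?_getD]
      rw [hidx]
      by_cases hl : t < (rows.getD r []).length
      · rw [if_pos (by exact_mod_cast Nat.lt_of_lt_of_le (min_lt_iff.mpr (Or.inl hl) : min t _ < _) le_rfl)]
        have hmin : min t ((rows.getD r []).length) = t := Nat.min_eq_left hl.le
        have hset : PySem.List.pySetD
            (pre ++ ((min t ((rows.getD r []).length) : Nat) : Int) ::
              os'.map (fun r => ((min t ((rows.getD r []).length) : Nat) : Int))) (pre.length : Int)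
            (((min t ((rows.getD r []).length) : Nat) : Int) + 1) =
            (pre ++ [((min (t+1) ((rows.getD r []).length) : Nat) : Int)]) ++
              os'.map (fun r => ((min t ((rows.getD r []).length) : Nat) : Int)) := by
          rw [PySem.List.pySetD_natCast]
          have : ((min t ((rows.getD r []).length) : Nat) : Int) + 1 =
              ((min (t+1) ((rows.getD r []).length) : Nat) : Int) := by
            rw [hmin, Nat.min_eq_left hl]; push_cast; ring
          rw [this]
          simp
        rw [hset]
        have hstart : (pre.length : Int) + 1 =
            (((pre ++ [((min (t+1) ((rows.getD r []).length) : Nat) : Int)]).length : Nat) : Int) := by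
          simp
        rw [hstart]
        have hno' : (((chosen ++ [(PySem.List.pyGetD (rows.getD r [])
            ((min t ((rows.getD r []).length) : Nat) : Int) (0, ([] : PvSpot))).2]).length : Int) +
            ((pvPicks rows os' t).length : Int) ≤ count) := by
          rw [pvLayer_cons_of_lt rows r os' t hl] at hno
          simp at hno ⊢
          omega
        rw [ih (pre ++ [((min (t+1) ((rows.getD r []).length) : Nat) : Int)]) _ true hno']
        rw [List.map_cons]
        simp
      · rw [if_neg (by simp [Nat.min_eq_right (Nat.le_of_not_lt hl)])]
        rw [List.append_cons]
        have hstart : (pre.length : Int) + 1 =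
            (((pre ++ [((min t ((rows.getD r []).length) : Nat) : Int)]).length : Nat) : Int) := by
          simp
        rw [hstart]
        have hno' : ((chosen.length : Int) + ((pvPicks rows os' t).length : Int) ≤ count) := by
          rw [pvLayer_cons_of_ge rows r os' t hl] at hno
          exact hno
        rw [ih (pre ++ [((min t ((rows.getD r []).length) : Nat) : Int)]) chosen added hno']
        rw [List.map_cons]
        have : ((min t ((rows.getD r []).length) : Nat) : Int) =
            ((min (t + 1) ((rows.getD r []).length) : Nat) : Int) := by
          have := Nat.le_of_not_lt hl
          congr 1
          omega
        rw [this]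
        simp

lemma pvOuterA_spec (rows : PySem.Dict Char (List (Int × PvSpot))) (ord : List Char) (count : Int)
    (depth : Nat)
    (hd : ∀ c ∈ ord.map (fun r => (rows.getD r []).map (fun x => x.2)), c.length ≤ depth) :
    ∀ (fuel t : Nat) (chosen : List PvSpot), depth < t + fuel →
      pvOuterA rows ord count fuel chosen
          (ord.map (fun r => ((min t ((rows.getD r []).length) : Nat) : Int))) =
        chosen ++ (pvRest [] (ord.map (fun r => (rows.getD r []).map (fun x => x.2))) (depth - t) t).take
          ((count - chosen.length).toNat) := by
  intro fuel
  induction fuel with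
  | zero =>
    intro t chosen hf
    have : depth - t = 0 := by omega
    rw [this]
    show chosen = chosen ++ ([] : List PvSpot).take _
    simp
  | succ fuel ih =>
    intro t chosen hf
    rw [pvOuterA_succ]
    by_cases hcc : (chosen.length : Int) < count
    · rw [if_pos hcc]
      have hrun := pvInnerA_run rows count t ord ([] : List Int) chosen false
      simp only [List.length_nil, Nat.cast_zero, List.nil_append] at hrun
      obtain ⟨hrun1, hrun2⟩ := hrun
      by_cases hemp : pvPicks rows ord t = []
      · -- nothing pickable: the loop exits, and all remaining layers are empty
        have hflag : (pvInnerA rows count (PySem.List.enumerate ord) chosen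
            (ord.map (fun r => ((min t ((rows.getD r []).length) : Nat) : Int))) false).2.2 = false := by
          rw [hrun2, hemp]; simp
        rw [hflag]
        simp only [Bool.false_eq_true, if_false]
        rw [hrun1, hemp]
        have hall : ∀ c ∈ ord.map (fun r => (rows.getD r []).map (fun x => x.2)), c.length ≤ t := by
          intro c hc
          rcases List.mem_map.mp hc with ⟨r, hr, rfl⟩
          by_contra hgt
          push_neg at hgt
          have hmem : rows.getD r [] ∈
              ((ord.map (fun r => rows.getD r [])).filter (fun c => t < c.length)) :=
            List.mem_filter.mpr ⟨List.mem_map_of_mem hr, by simpa using hgt⟩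
          have : pvPicks rows ord t ≠ [] := by
            unfold pvPicks
            intro hnil
            rw [List.map_eq_nil_iff] at hnil
            rw [hnil] at hmem
            exact (List.not_mem_nil) hmem
          exact this hemp
        rw [pvRest_eq_nil _ _ _ _ hall]
      · have hlt : t < depth := by
          rcases List.exists_mem_of_ne_nil _ hemp with ⟨x, hx⟩
          unfold pvPicks at hx
          rcases List.mem_map.mp hx with ⟨c, hc, rfl⟩
          have hc2 := List.mem_filter.mp hc
          rcases List.mem_map.mp hc2.1 with ⟨r, hr, rfl⟩
          have h1 : t < (rows.getD r []).length := by simpa using hc2.2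
          have h2 := hd ((rows.getD r []).map (fun x => x.2)) (List.mem_map_of_mem hr)
          simp at h2
          omega
        have hsplit : depth - t = (depth - (t + 1)) + 1 := by omega
        by_cases hbr : (chosen.length : Int) + ((pvPicks rows ord t).length : Int) ≤ count
        · -- full pass, no break
          have hflag : (pvInnerA rows count (PySem.List.enumerate ord) chosen
              (ord.map (fun r => ((min t ((rows.getD r []).length) : Nat) : Int))) false).2.2 = true := by
            rw [hrun2]
            simp [hcc, hemp]
          rw [hflag]
          simp only [if_true]
          have hridx := pvInnerA_ridx rows count t ord ([] : List Int) chosen false hbr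
          simp only [List.length_nil, Nat.cast_zero, List.nil_append] at hridx
          have htake : (pvPicks rows ord t).take ((count - chosen.length).toNat) =
              pvPicks rows ord t := by
            apply List.take_of_length_le
            omega
          rw [hrun1, htake, hridx]
          rw [ih (t + 1) (chosen ++ pvPicks rows ord t) (by omega)]
          rw [hsplit]
          show _ = chosen ++ (pvLayer _ _ t ++ pvRest _ _ (depth - (t+1)) (t+1)).take _
          rw [← pvPicks_eq_layer]
          have harith : (count - (chosen.length : Int)).toNat =
              (pvPicks rows ord t).length + (count - ((chosen ++ pvPicks rows ord t).length : Int)).toNat := by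
            simp
            omega
          rw [harith, List.take_append]
          simp
        · -- break in the middle of the pass: chosen fills up to count and the loop exits next
          have hflag : (pvInnerA rows count (PySem.List.enumerate ord) chosen
              (ord.map (fun r => ((min t ((rows.getD r []).length) : Nat) : Int))) false).2.2 = true := by
            rw [hrun2]
            simp [hcc, hemp]
          rw [hflag]
          simp only [if_true]
          have hlen : (((pvInnerA rows count (PySem.List.enumerate ord) chosen
              (ord.map (fun r => ((min t ((rows.getD r []).length) : Nat) : Int))) false).1).length : Int)
              = count := by
            rw [hrun1]
            simp
            omega
          obtain ⟨fuel', rfl⟩ : ∃ f', fuel = f' + 1 := by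
            refine ⟨fuel - 1, ?_⟩
            omega
          rw [pvOuterA_succ, if_neg (by rw [hlen]; omega)]
          rw [hrun1]
          rw [hsplit]
          show _ = chosen ++ (pvLayer _ _ t ++ pvRest _ _ (depth - (t+1)) (t+1)).take _
          rw [← pvPicks_eq_layer]
          rw [List.take_append_of_le_length (by omega)]
    · rw [if_neg hcc]
      have : (count - (chosen.length : Int)).toNat = 0 := by omega
      rw [this]
      simp

-- ========== B side: the global lex sort equals the layer concatenation ==========

-- B's key tuple type and a default never read (layers only index in range)
abbrev PvKT := Int × Int × PvSpot

def pvDflt0 : PvKT := (0, 0, [])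

-- the keyed matrix: row ri holds the triples (rank, ri, spot) of row ri
def pvTag (fs : List (List (String × String))) : List (List PvKT) :=
  (PySem.List.enumerate (pvOrderB fs)).map (fun p =>
    (PySem.List.enumerate (PySem.List.sorted ((pvRowsB fs).getD p.2 []) (fun t => t.1))).map
      (fun q => (q.1, p.1, q.2.2)))

-- sorting with a two-component key is sorting with the lexicographic key
lemma pvSorted2_eq_sorted_lex {α : Type} (xs : List α) (k1 k2 : α → Int) :
    PySem.List.sorted2 xs k1 k2 =
      PySem.List.sorted xs (fun x => (toLex (k1 x, k2 x) : Lex (Int × Int))) := by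
  rw [PySem.List.sorted_eq_foldl_insertBy]
  unfold PySem.List.sorted2
  simp only []
  congr 1
  funext acc x
  congr 1
  funext a b
  have h : ((toLex (k1 a, k2 a) : Lex (Int × Int)) < toLex (k1 b, k2 b)) ↔
      (k1 a < k1 b ∨ (¬ k1 b < k1 a ∧ k2 a < k2 b)) := by
    rw [Prod.Lex.lt_iff]
    simp only [ofLex_toLex]
    constructor
    · rintro (h | ⟨h1, h2⟩)
      · exact Or.inl h
      · exact Or.inr ⟨by omega, h2⟩
    · rintro (h | ⟨h1, h2⟩)
      · exact Or.inl h
      · by_cases he : k1 a < k1 b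
        · exact Or.inl he
        · exact Or.inr ⟨by omega, h2⟩
  simp only [if_neg (Bool.false_ne_true), ← decide_not, ← Bool.decide_and, ← Bool.decide_or]
  rw [decide_eq_decide]
  exact h.symm

lemma pvKeyedB_eq_flatten (fs : List (List (String × String))) :
    pvKeyedB fs = (pvTag fs).flatten := by
  unfold pvKeyedB pvTag
  rw [List.flatMap_def]

lemma pvLayer_drop {α : Type} (dflt : α) (xss : List (List α)) (t : Nat) :
    pvLayer dflt (xss.map (List.drop 1)) t = pvLayer dflt xss (t + 1) := by
  unfold pvLayer
  rw [List.filter_map, List.map_map]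
  have hp : ((fun c : List α => decide (t < c.length)) ∘ List.drop 1) =
      (fun c : List α => decide (t + 1 < c.length)) := by
    funext c
    simp only [Function.comp, List.length_drop]
    rw [decide_eq_decide]
    omega
  rw [hp]
  apply List.map_congr_left
  intro c hc
  have hlen : t + 1 < c.length := by simpa using (List.mem_filter.mp hc).2
  simp only [Function.comp]
  rw [List.getD_eq_getElem _ _ (by simp [List.length_drop]; omega),
    List.getD_eq_getElem _ _ hlen, List.getElem_drop]
  simp [show 1 + t = t + 1 from by omega]

lemma pvRest_drop {α : Type} (dflt : α) (xss : List (List α)) :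
    ∀ (d t : Nat), pvRest dflt xss d (t + 1) = pvRest dflt (xss.map (List.drop 1)) d t := by
  intro d
  induction d with
  | zero => intro t; rfl
  | succ d ih =>
    intro t
    show pvLayer dflt xss (t + 1) ++ pvRest dflt xss d (t + 2) =
      pvLayer dflt (xss.map (List.drop 1)) t ++ pvRest dflt (xss.map (List.drop 1)) d (t + 1)
    rw [pvLayer_drop, ih (t + 1)]

lemma pvHeads_perm {α : Type} (dflt : α) (xss : List (List α)) :
    (pvLayer dflt xss 0 ++ (xss.map (List.drop 1)).flatten).Perm xss.flatten := by
  induction xss with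
  | nil => simp [pvLayer]
  | cons c cs ih =>
    cases c with
    | nil =>
      have h1 : pvLayer dflt ([] :: cs) 0 = pvLayer dflt cs 0 := by
        unfold pvLayer
        simp
      rw [h1]
      simpa using ih
    | cons x c' =>
      have h1 : pvLayer dflt ((x :: c') :: cs) 0 = x :: pvLayer dflt cs 0 := by
        unfold pvLayer
        simp
      rw [h1]
      show (x :: (pvLayer dflt cs 0 ++ (c' ++ (cs.map (List.drop 1)).flatten))).Perm
        (x :: (c' ++ cs.flatten))
      refine List.Perm.cons x ?_
      exact (List.perm_append_comm_assoc _ _ _).trans (List.Perm.append_left c' ih)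

lemma pvRest_perm_flatten {α : Type} (dflt : α) :
    ∀ (d : Nat) (xss : List (List α)), (∀ c ∈ xss, c.length ≤ d) →
      (pvRest dflt xss d 0).Perm xss.flatten := by
  intro d
  induction d with
  | zero =>
    intro xss h
    have : xss.flatten = [] := by
      rw [List.flatten_eq_nil_iff]
      intro c hc
      have := h c hc
      exact List.eq_nil_of_length_eq_zero (by omega)
    rw [this]
    exact List.Perm.refl _
  | succ d ih =>
    intro xss h
    show (pvLayer dflt xss 0 ++ pvRest dflt xss d 1).Perm xss.flatten
    have h1 : pvRest dflt xss d 1 = pvRest dflt (xss.map (List.drop 1)) d 0 :=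
      pvRest_drop dflt xss d 0
    rw [h1]
    have hb : ∀ c ∈ xss.map (List.drop 1), c.length ≤ d := by
      intro c hc
      rcases List.mem_map.mp hc with ⟨c0, hc0, rfl⟩
      have := h c0 hc0
      simp [List.length_drop]
      omega
    exact ((List.Perm.append_left _ (ih _ hb)).trans (pvHeads_perm dflt xss))

lemma pvMem_pvRest {α : Type} (dflt : α) (xss : List (List α)) :
    ∀ (d t : Nat) (e : α), e ∈ pvRest dflt xss d t → ∃ c ∈ xss, e ∈ c := by
  intro d
  induction d with
  | zero => intro t e he; cases he
  | succ d ih =>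
    intro t e he
    rcases List.mem_append.mp he with h | h
    · unfold pvLayer at h
      rcases List.mem_map.mp h with ⟨c, hc, rfl⟩
      have hfc := List.mem_filter.mp hc
      have hlt : t < c.length := by simpa using hfc.2
      refine ⟨c, hfc.1, ?_⟩
      rw [List.getD_eq_getElem _ _ hlt]
      exact List.getElem_mem hlt
    · exact ih (t + 1) e h

-- shape invariant of the keyed matrix: element j of a row carries first component t + j,
-- and second components strictly increase row by row
def pvGood (xss : List (List PvKT)) (t : Nat) : Prop :=
  (∀ c ∈ xss, ∀ (j : Nat) (h : j < c.length), (getElem c j h).1 = (t : Int) + j) ∧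
  xss.Pairwise (fun c c' => ∀ e ∈ c, ∀ e' ∈ c', e.2.1 < e'.2.1)

lemma pvGood_drop (xss : List (List PvKT)) (t : Nat) (h : pvGood xss t) :
    pvGood (xss.map (List.drop 1)) (t + 1) := by
  obtain ⟨h1, h2⟩ := h
  unfold pvGood
  constructor
  · intro c hc j hj
    rcases List.mem_map.mp hc with ⟨c0, hc0, rfl⟩
    have hj0 : 1 + j < c0.length := by
      have := hj
      simp [List.length_drop] at this
      omega
    rw [List.getElem_drop]
    rw [h1 c0 hc0 (1 + j) hj0]
    push_cast
    ring
  · refine (List.pairwise_map.mpr (h2.imp ?_))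
    intro c c' hcc e he e' he'
    exact hcc e (List.mem_of_mem_drop he) e' (List.mem_of_mem_drop he')

lemma pvGood_first (xss : List (List PvKT)) (t : Nat) (h : pvGood xss t)
    (e : PvKT) (c : List PvKT) (hc : c ∈ xss) (he : e ∈ c) : (t : Int) ≤ e.1 := by
  rcases List.mem_iff_getElem.mp he with ⟨j, hj, rfl⟩
  have := h.1 c hc j hj
  omega

lemma pvRest_pairwise :
    ∀ (d : Nat) (xss : List (List PvKT)) (t : Nat), pvGood xss t →
      (pvRest pvDflt0 xss d 0).Pairwise
        (fun a b => (toLex (a.1, a.2.1) : Lex (Int × Int)) < toLex (b.1, b.2.1)) := by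
  intro d
  induction d with
  | zero => intro xss t _; exact List.Pairwise.nil
  | succ d ih =>
    intro xss t hg
    show (pvLayer pvDflt0 xss 0 ++ pvRest pvDflt0 xss d 1).Pairwise _
    have h1 : pvRest pvDflt0 xss d 1 = pvRest pvDflt0 (xss.map (List.drop 1)) d 0 :=
      pvRest_drop pvDflt0 xss d 0
    rw [h1]
    apply List.pairwise_append.mpr
    refine ⟨?_, ih _ (t + 1) (pvGood_drop xss t hg), ?_⟩
    · -- within the first layer: first components all equal t, second components increase
      unfold pvLayer
      apply List.pairwise_map.mpr
      have hpf : (xss.filter (fun c => 0 < c.length)).Pairwise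
          (fun c c' => ∀ e ∈ c, ∀ e' ∈ c', e.2.1 < e'.2.1) := hg.2.filter _
      refine List.Pairwise.imp_of_mem ?_ hpf
      intro c c' hc hc' hcc
      have hlc : 0 < c.length := by simpa using (List.mem_filter.mp hc).2
      have hlc' : 0 < c'.length := by simpa using (List.mem_filter.mp hc').2
      have hmc : c.getD 0 pvDflt0 ∈ c := by
        rw [List.getD_eq_getElem _ _ hlc]; exact List.getElem_mem hlc
      have hmc' : c'.getD 0 pvDflt0 ∈ c' := by
        rw [List.getD_eq_getElem _ _ hlc']; exact List.getElem_mem hlc'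
      have h2 := hcc _ hmc _ hmc'
      have ha : (c.getD 0 pvDflt0).1 = (t : Int) := by
        rw [List.getD_eq_getElem _ _ hlc]
        rw [hg.1 c (List.mem_filter.mp hc).1 0 hlc]
        simp
      have hb : (c'.getD 0 pvDflt0).1 = (t : Int) := by
        rw [List.getD_eq_getElem _ _ hlc']
        rw [hg.1 c' (List.mem_filter.mp hc').1 0 hlc']
        simp
      rw [Prod.Lex.lt_iff]
      simp only [ofLex_toLex]
      exact Or.inr ⟨by rw [ha, hb], h2⟩
    · -- across: first layer has first component t, the rest at least t + 1
      intro a ha b hb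
      have ha1 : a.1 = (t : Int) := by
        unfold pvLayer at ha
        rcases List.mem_map.mp ha with ⟨c, hc, rfl⟩
        have hlc : 0 < c.length := by simpa using (List.mem_filter.mp hc).2
        rw [List.getD_eq_getElem _ _ hlc]
        rw [hg.1 c (List.mem_filter.mp hc).1 0 hlc]
        simp
      have hb1 : ((t : Int) + 1) ≤ b.1 := by
        rcases pvMem_pvRest pvDflt0 _ d 0 b hb with ⟨c, hc, hbc⟩
        have := pvGood_first _ (t + 1) (pvGood_drop xss t hg) b c hc hbc
        push_cast at this
        omega
      rw [Prod.Lex.lt_iff]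
      simp only [ofLex_toLex]
      exact Or.inl (by omega)

lemma pvGood_tag (fs : List (List (String × String))) : pvGood (pvTag fs) 0 := by
  unfold pvGood
  constructor
  · intro c hc j hj
    unfold pvTag at hc
    rcases List.mem_map.mp hc with ⟨p, _, rfl⟩
    have hj' : j < (PySem.List.enumerate
        (PySem.List.sorted ((pvRowsB fs).getD p.2 []) (fun t => t.1))).length := by
      simpa using hj
    rw [List.getElem_map]
    show ((PySem.List.enumerate _)[j]'hj').1 = _
    rw [PySem.List.getElem_enumerate]
    simp
  · unfold pvTag
    apply List.pairwise_map.mpr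
    refine (PySem.List.pairwise_lt_enumerate _ _).imp ?_
    intro p p' hpp e he e' he'
    rcases List.mem_map.mp he with ⟨q, _, rfl⟩
    rcases List.mem_map.mp he' with ⟨q', _, rfl⟩
    exact hpp

lemma pvTag_proj (fs : List (List (String × String))) :
    (pvTag fs).map (List.map (fun x : PvKT => x.2.2)) = pvColsB fs := by
  unfold pvTag pvColsB
  rw [List.map_map]
  have hin : (List.map (fun x : PvKT => x.2.2) ∘ fun p : Int × Char =>
      (PySem.List.enumerate (PySem.List.sorted ((pvRowsB fs).getD p.2 []) (fun t => t.1))).map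
        (fun q => (q.1, p.1, q.2.2))) =
      ((fun r : Char =>
        (PySem.List.sorted ((pvRowsB fs).getD r []) (fun x => x.1)).map (fun x => x.2)) ∘
          Prod.snd) := by
    funext p
    simp only [Function.comp, List.map_map]
    have hcomp : ((fun x : PvKT => x.2.2) ∘ fun q : Int × (Int × PvSpot) => (q.1, p.1, q.2.2)) =
        ((fun x : Int × PvSpot => x.2) ∘ Prod.snd) := rfl
    rw [hcomp, ← List.map_map, PySem.List.map_snd_enumerate]
  rw [hin, ← List.map_map, PySem.List.map_snd_enumerate]

lemma pvLayer_map {α β : Type} (f : α → β) (dflt : α) (xss : List (List α)) (t : Nat) :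
    (pvLayer dflt xss t).map f = pvLayer (f dflt) (xss.map (List.map f)) t := by
  unfold pvLayer
  rw [List.filter_map, List.map_map, List.map_map]
  have hp : ((fun c : List β => decide (t < c.length)) ∘ List.map f) =
      (fun c : List α => decide (t < c.length)) := by
    funext c
    simp [Function.comp]
  rw [hp]
  apply List.map_congr_left
  intro c hc
  have hlt : t < c.length := by simpa using (List.mem_filter.mp hc).2
  simp only [Function.comp]
  rw [List.getD_eq_getElem _ _ hlt, List.getD_eq_getElem _ _ (by simpa using hlt),
    List.getElem_map]

lemma pvRest_map {α β : Type} (f : α → β) (dflt : α) (xss : List (List α)) :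
    ∀ (d t : Nat), (pvRest dflt xss d t).map f = pvRest (f dflt) (xss.map (List.map f)) d t := by
  intro d
  induction d with
  | zero => intro t; rfl
  | succ d ih =>
    intro t
    show (pvLayer dflt xss t ++ pvRest dflt xss d (t + 1)).map f = _
    rw [List.map_append, pvLayer_map, ih (t + 1)]
    rfl

lemma pvTag_len_le (fs : List (List (String × String))) (D : Nat)
    (hD : ∀ c ∈ pvColsB fs, c.length ≤ D) :
    ∀ c ∈ pvTag fs, c.length ≤ D := by
  intro c hc
  unfold pvTag at hc
  rcases List.mem_map.mp hc with ⟨p, hp, rfl⟩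
  have hmem : p.2 ∈ pvOrderB fs := by
    rcases (PySem.List.mem_enumerate_iff _ _ _).mp hp with ⟨k, hk, rfl⟩
    exact List.getElem_mem hk
  have hcc : (PySem.List.sorted ((pvRowsB fs).getD p.2 []) (fun x => x.1)).map (fun x => x.2)
      ∈ pvColsB fs := by
    unfold pvColsB
    exact List.mem_map_of_mem hmem
  have := hD _ hcc
  rw [List.length_map, PySem.List.length_enumerate]
  simpa using this

-- B's pipeline equals the layer concatenation, truncated
lemma pvAltB_eq (fs : List (List (String × String))) (count : Int) (D : Nat)
    (hD : ∀ c ∈ pvColsB fs, c.length ≤ D) :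
    pick_spots_by_row_py_alt fs count = (pvRest [] (pvColsB fs) D 0).take count.toNat := by
  unfold pick_spots_by_row_py_alt
  have hperm : (pvRest pvDflt0 (pvTag fs) D 0).Perm (pvKeyedB fs) := by
    rw [pvKeyedB_eq_flatten]
    exact pvRest_perm_flatten pvDflt0 D _ (pvTag_len_le fs D hD)
  have hsort : PySem.List.sorted2 (pvKeyedB fs) (fun t => t.1) (fun t => t.2.1) =
      pvRest pvDflt0 (pvTag fs) D 0 := by
    rw [pvSorted2_eq_sorted_lex]
    exact PySem.List.sorted_eq_of_perm_of_pairwise_lt (pvKeyedB fs)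
      (pvRest pvDflt0 (pvTag fs) D 0)
      (fun x : PvKT => (toLex (x.1, x.2.1) : Lex (Int × Int))) hperm
      (pvRest_pairwise D (pvTag fs) 0 (pvGood_tag fs))
  rw [hsort, PySem.List.slice_to _ (le_max_right count 0)]
  have hmc : (max count 0).toNat = count.toNat := by omega
  rw [hmc, List.map_take, pvRest_map, pvTag_proj]
  rfl

-- ===== VERDICT (by name: the statement is the Claim_ definition above) =====
theorem pick_spots_by_row_py_spec : Claim_equal_pick_spots_by_row_py := by
  intro fs count _ _
  show pick_spots_by_row_py fs count = pick_spots_by_row_py_alt fs count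
  have hcols : (pvOrderA fs).map (fun r => ((pvRows2A fs).getD r []).map (fun x => x.2)) =
      pvColsB fs := by
    unfold pvColsB pvOrderB pvOrderA
    rw [pvRowsB_eq_rowsA, pvRows2A_keys]
    have hpr : pvRowPriorityB = pvRowPriorityA := rfl
    rw [hpr]
    apply List.map_congr_left
    intro r _
    rw [pvRows2A_getD]
  have hlen : ∀ c ∈ pvColsB fs, c.length ≤ fs.length := by
    intro c hc
    unfold pvColsB at hc
    rcases List.mem_map.mp hc with ⟨r, _, rfl⟩
    rw [List.length_map, PySem.List.length_sorted, pvRowsB_eq_rowsA]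
    exact pvRowsA_getD_len_le fs r
  have hdd : ∀ c ∈ (pvOrderA fs).map (fun r => ((pvRows2A fs).getD r []).map (fun x => x.2)),
      c.length ≤ fs.length := by
    rw [hcols]
    exact hlen
  have hrep : List.replicate (pvOrderA fs).length (0 : Int) =
      (pvOrderA fs).map (fun r => ((min 0 (((pvRows2A fs).getD r []).length) : Nat) : Int)) := by
    simp
  show pvOuterA (pvRows2A fs) (pvOrderA fs) count (fs.length + 2) []
      (List.replicate (pvOrderA fs).length 0) = _
  rw [hrep]
  rw [pvOuterA_spec (pvRows2A fs) (pvOrderA fs) count fs.length hdd (fs.length + 2) 0 [] (by omega)]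
  rw [pvAltB_eq fs count fs.length hlen]
  rw [hcols]
  simp
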